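-- pv_equiv track=rewrite | github.com/JonathanLu2005/LeetCode | 3895-count-digit-appearances/3895-count-digit-appearances.py | countDigitOccurrences
-- ===== SOURCE A (Python) =====
-- def countDigitOccurrences(nums: list[int], digit: int) -> int:
--     # i mean just lienar innit
--     result = 0
--     digit = str(digit)
--
--     for x in nums:
--         for y in str(x):
--             if y == digit:
--                 result += 1
--
--     return result
-- ===== SOURCE B (Python) =====
-- def countDigitOccurrences(nums: list[int], digit: int) -> int:
--     # Pure arithmetic: no string conversion at all.  A digit character can only
--     # match str(digit) when 0 <= digit <= 9; otherwise the answer is 0.  For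
--     # each number, extract its decimal digits with a divmod loop on abs(x)
--     # (a do-while so that 0 contributes its single digit '0').
--     if not 0 <= digit <= 9:
--         return 0
--     total = 0
--     for x in nums:
--         x = abs(x)
--         while True:
--             if x % 10 == digit:
--                 total += 1
--             x //= 10
--             if x == 0:
--                 break
--     return total
-- ===== Notes on version B (the rewrite author's own statement) =====
-- stated objective: faster
-- what changed: B converts nothing to strings: it rejects digits outside 0..9 up front and counts matches by extracting each number's decimal digits arithmetically with a divmod do-while loop on abs(x), instead of A's per-character comparison against str(digit).
import Mathlib
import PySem

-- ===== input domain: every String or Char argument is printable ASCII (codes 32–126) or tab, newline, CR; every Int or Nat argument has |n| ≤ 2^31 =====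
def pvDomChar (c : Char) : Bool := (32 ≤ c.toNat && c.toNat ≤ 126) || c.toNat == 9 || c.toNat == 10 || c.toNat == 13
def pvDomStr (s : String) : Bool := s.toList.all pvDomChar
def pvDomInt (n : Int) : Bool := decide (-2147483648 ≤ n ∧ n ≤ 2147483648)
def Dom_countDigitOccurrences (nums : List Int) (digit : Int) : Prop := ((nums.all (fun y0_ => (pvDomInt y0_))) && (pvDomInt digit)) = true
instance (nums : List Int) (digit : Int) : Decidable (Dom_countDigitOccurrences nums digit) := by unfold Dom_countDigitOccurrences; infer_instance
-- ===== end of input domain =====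

-- B abandons string conversion entirely: it counts decimal digits arithmetically with a
-- divmod do-while per number (after rejecting digit outside 0..9); measurably faster (constant factor).


-- ===== PORT A =====
-- A compares each character y of str(x) with str(digit); the 1-char string y is
-- represented as the char list [y], exact for string equality.
def countDigitOccurrences (nums : List Int) (digit : Int) : Int :=
  let digitS := PySem.Int.toChars digit
  nums.foldl (fun result x =>
    (PySem.Int.toChars x).foldl (fun result y =>
      if [y] = digitS then result + 1 else result) result) 0

-- ===== PORT B =====
-- the do-while: test x % 10, then x //= 10, stop when x hits 0 (so 0 yields one digit)
def pvDigitCount (x d : Nat) : Int :=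
  (if x % 10 = d then 1 else 0) + (if x / 10 = 0 then 0 else pvDigitCount (x / 10) d)
decreasing_by exact Nat.div_lt_self (by omega) (by omega)

def countDigitOccurrences_alt (nums : List Int) (digit : Int) : Int :=
  if digit < 0 ∨ 9 < digit then 0
  else nums.foldl (fun total x => total + pvDigitCount x.natAbs digit.toNat) 0

-- ===== PRECONDITION & SPEC =====
def Spec_countDigitOccurrences (nums : List Int) (digit : Int) (out : Int) : Prop := out = countDigitOccurrences_alt nums digit
instance (nums : List Int) (digit : Int) (out : Int) : Decidable (Spec_countDigitOccurrences nums digit out) := by unfold Spec_countDigitOccurrences; infer_instance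

-- ===== CLAIM (what is proved, stated in full; the proofs are below) =====
def Claim_equal_countDigitOccurrences : Prop := ∀ (nums : List Int) (digit : Int), Dom_countDigitOccurrences nums digit → Spec_countDigitOccurrences nums digit (countDigitOccurrences nums digit)

-- ===== LEMMAS AND PROOFS =====

-- A's inner loop is a count of the characters equal (as 1-char strings) to digitS.
theorem pv_foldA (L : List Char) (l : List Char) (r : Int) :
    l.foldl (fun result y => if [y] = L then result + 1 else result) r
      = r + (l.countP (fun y => [y] == L) : Int) := by
  have h : (fun (result : Int) (y : Char) => if [y] = L then result + 1 else result)
      = (fun result y => if ([y] == L) = true then result + 1 else result) := by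
    funext result y; simp
  rw [h, PySem.List.foldl_count_if]

-- Nat.toDigitsCore grows its accumulator: the result is at least one char longer.
theorem pv_core_len (fuel n : Nat) (ds : List Char) (hf : 0 < fuel) :
    ds.length + 1 ≤ (Nat.toDigitsCore 10 fuel n ds).length := by
  induction fuel generalizing n ds with
  | zero => omega
  | succ f ih =>
    simp only [Nat.toDigitsCore]
    by_cases h : n / 10 = 0
    · rw [if_pos h]; simp
    · rw [if_neg h]
      rcases Nat.eq_zero_or_pos f with hf0 | hf0
      · subst hf0; simp [Nat.toDigitsCore]
      · have := ih (n / 10) ((n % 10).digitChar :: ds) hf0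
        simp only [List.length_cons] at this; omega

theorem pv_count_cons_int (a c : Char) (ds : List Char) :
    (((a :: ds).count c : Nat) : Int) = (if a = c then 1 else 0) + (ds.count c : Int) := by
  by_cases h : a = c <;> simp [h] <;> omega

-- counting one char through Nat.toDigitsCore equals the arithmetic digit recursion
def pvCntChar (n : Nat) (c : Char) : Int :=
  (if (n % 10).digitChar = c then 1 else 0) + (if n / 10 = 0 then 0 else pvCntChar (n / 10) c)
decreasing_by exact Nat.div_lt_self (by omega) (by omega)

theorem pv_core_count (fuel n : Nat) (ds : List Char) (c : Char) (h : n < fuel) :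
    ((Nat.toDigitsCore 10 fuel n ds).count c : Int) = pvCntChar n c + (ds.count c : Int) := by
  induction fuel generalizing n ds with
  | zero => omega
  | succ f ih =>
    rw [pvCntChar]
    simp only [Nat.toDigitsCore]
    by_cases hnd : n / 10 = 0
    · rw [if_pos hnd, if_pos hnd, pv_count_cons_int]; ring
    · have hn10 : n / 10 < f := by
        have h1 : n / 10 < n := Nat.div_lt_self (by omega) (by omega)
        omega
      rw [if_neg hnd, if_neg hnd, ih (n / 10) ((n % 10).digitChar :: ds) hn10,
        pv_count_cons_int]
      ring

theorem pv_digitChar_inj (a b : Nat) (ha : a ≤ 9) (hb : b ≤ 9) :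
    (Nat.digitChar a = Nat.digitChar b) ↔ a = b := by
  interval_cases a <;> interval_cases b <;> decide

theorem pv_cntChar_eq (n d : Nat) (hd : d ≤ 9) :
    pvCntChar n (Nat.digitChar d) = pvDigitCount n d := by
  induction n using Nat.strong_induction_on with
  | _ n ih =>
    rw [pvCntChar, pvDigitCount]
    have hmod : n % 10 ≤ 9 := by omega
    simp only [pv_digitChar_inj (n % 10) d hmod hd]
    by_cases hnd : n / 10 = 0
    · simp [hnd]
    · rw [if_neg hnd, if_neg hnd, ih (n / 10) (Nat.div_lt_self (by omega) (by omega))]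

-- for 0 ≤ digit ≤ 9, str(digit) is the single digit character
theorem pv_digitS (digit : Int) (h0 : 0 ≤ digit) (h9 : digit ≤ 9) :
    PySem.Int.toChars digit = [Nat.digitChar digit.toNat] := by
  interval_cases digit <;> decide

-- per-number agreement in the in-range case
theorem pv_inner_eq (x : Int) (d : Nat) (hd : d ≤ 9) (r : Int) :
    (PySem.Int.toChars x).foldl (fun result y =>
      if [y] = [Nat.digitChar d] then result + 1 else result) r
      = r + pvDigitCount x.natAbs d := by
  rw [pv_foldA]
  have hcnt : ((PySem.Int.toChars x).countP (fun y => [y] == [Nat.digitChar d]) : Int)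
      = pvDigitCount x.natAbs d := by
    have hp : (fun (y : Char) => [y] == [Nat.digitChar d]) = (fun y => y == Nat.digitChar d) := by
      funext y; simp
    rw [hp]
    have hcount : ∀ (l : List Char), l.countP (fun y => y == Nat.digitChar d) = l.count (Nat.digitChar d) := by
      intro l; rfl
    rw [hcount]
    have hdash : ¬ ('-' = Nat.digitChar d) := by interval_cases d <;> decide
    unfold PySem.Int.toChars
    by_cases hx : x < 0
    · rw [if_pos hx]
      rw [pv_count_cons_int, if_neg hdash]
      simp only [Nat.toDigits]
      rw [pv_core_count (x.natAbs + 1) x.natAbs [] (Nat.digitChar d) (by omega)]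
      simp [pv_cntChar_eq _ _ hd]
    · rw [if_neg hx]
      have habs : x.toNat = x.natAbs := by omega
      simp only [Nat.toDigits]
      rw [pv_core_count (x.toNat + 1) x.toNat [] (Nat.digitChar d) (by omega)]
      simp [habs, pv_cntChar_eq _ _ hd]
  omega

-- out-of-range case: str(digit) has at least two characters, so no single char matches
theorem pv_digitS_long (digit : Int) (h : digit < 0 ∨ 9 < digit) :
    2 ≤ (PySem.Int.toChars digit).length := by
  unfold PySem.Int.toChars
  rcases h with h | h
  · rw [if_pos (by omega)]
    have h1 : 1 ≤ (Nat.toDigits 10 digit.natAbs).length := by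
      simpa [Nat.toDigits] using pv_core_len (digit.natAbs + 1) digit.natAbs [] (by omega)
    simp only [List.length_cons]; omega
  · rw [if_neg (by omega)]
    have h10 : 10 ≤ digit.toNat := by omega
    simp only [Nat.toDigits, Nat.toDigitsCore]
    have hnd : ¬ (digit.toNat / 10 = 0) := by
      intro hc; omega
    rw [if_neg hnd]
    have := pv_core_len digit.toNat (digit.toNat / 10) [(digit.toNat % 10).digitChar] (by omega)
    simpa using this

theorem pv_fold_nomatch (L : List Char) (hL : 2 ≤ L.length) (l : List Char) (r : Int) :
    l.foldl (fun result y => if [y] = L then result + 1 else result) r = r := by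
  induction l generalizing r with
  | nil => rfl
  | cons c t ih =>
    have : ¬ ([c] = L) := by
      intro h; rw [← h] at hL; simp at hL
    simp only [List.foldl_cons, if_neg this]
    exact ih r

-- ===== VERDICT (by name: the statement is the Claim_ definition above) =====
theorem countDigitOccurrences_spec : Claim_equal_countDigitOccurrences := by
  intro nums digit _
  unfold Spec_countDigitOccurrences countDigitOccurrences countDigitOccurrences_alt
  by_cases h : digit < 0 ∨ 9 < digit
  · rw [if_pos h]
    simp only []
    have hstep : ∀ (r : Int) (x : Int),
        (PySem.Int.toChars x).foldl (fun result y =>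
          if [y] = PySem.Int.toChars digit then result + 1 else result) r = r := by
      intro r x; exact pv_fold_nomatch _ (pv_digitS_long digit h) _ r
    have houter : ∀ (t : List Int) (r : Int),
        t.foldl (fun result x =>
          (PySem.Int.toChars x).foldl (fun result y =>
            if [y] = PySem.Int.toChars digit then result + 1 else result) result) r = r := by
      intro t
      induction t with
      | nil => intro r; rfl
      | cons x t ih => intro r; rw [List.foldl_cons, hstep]; exact ih _
    exact houter nums 0
  · rw [if_neg h]
    have hd9 : digit.toNat ≤ 9 := by omega
    have h0 : 0 ≤ digit := by omega
    have h9 : digit ≤ 9 := by omega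
    simp only []
    rw [pv_digitS digit h0 h9]
    have hfun : (fun (result : Int) (x : Int) =>
        (PySem.Int.toChars x).foldl (fun result y =>
          if [y] = [Nat.digitChar digit.toNat] then result + 1 else result) result)
        = (fun total x => total + pvDigitCount x.natAbs digit.toNat) := by
      funext r x; exact pv_inner_eq x digit.toNat hd9 r
    rw [hfun]
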